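-- pv_equiv track=rewrite | github.com/JadenHeo/PS-Study | Programmers/Lv2_스킬트리2.py | solution
-- ===== SOURCE A (Python) =====
-- from collections import defaultdict
--
-- def solution(skills_order, skill_tree):
--     skills_order = defaultdict(int, {skill : idx for idx, skill in enumerate(skills_order)})
--     skill_count = 1
--     for skill in skill_tree:
--         if skills_order[skill] > skill_count:
--             return False
--         elif skills_order[skill] == skill_count:
--             skill_count += 1
--     return True
-- ===== SOURCE B (Python) =====
-- def solution(skills_order, skill_tree):
--     pos = {skill: idx for idx, skill in enumerate(skills_order)}
--     seen = set()
--     seq = []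
--     for skill in skill_tree:
--         v = pos.get(skill, 0)
--         if v >= 1 and v not in seen:
--             seen.add(v)
--             seq.append(v)
--     return seq == list(range(1, len(seq) + 1))
-- ===== Notes on version B (the rewrite author's own statement) =====
-- stated objective: alternative
-- what changed: Replaces A's online counter with early exit by collecting the distinct positions >= 1 in first-appearance order and comparing that subsequence to the canonical range 1..m at the end.
import Mathlib
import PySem

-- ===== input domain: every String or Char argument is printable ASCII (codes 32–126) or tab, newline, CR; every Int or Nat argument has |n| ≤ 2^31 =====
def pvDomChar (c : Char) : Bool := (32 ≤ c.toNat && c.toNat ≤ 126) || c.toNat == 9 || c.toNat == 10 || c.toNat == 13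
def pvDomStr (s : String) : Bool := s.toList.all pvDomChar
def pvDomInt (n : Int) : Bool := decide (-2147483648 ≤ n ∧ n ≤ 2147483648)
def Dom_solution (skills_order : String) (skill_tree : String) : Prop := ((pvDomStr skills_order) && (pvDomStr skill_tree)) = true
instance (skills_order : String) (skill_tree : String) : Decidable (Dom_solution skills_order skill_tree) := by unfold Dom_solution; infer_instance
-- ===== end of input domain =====

-- B replaces A's online counter-with-early-exit by collecting the distinct positions ≥ 1
-- in first-appearance order and comparing that subsequence to the range 1..m at the end.


-- shared helper: {skill: idx for idx, skill in enumerate(skills_order)}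
def mkPos (skills_order : String) : PySem.Dict Char Int :=
  (PySem.List.enumerate skills_order.toList 0).foldl (fun d p => d.insert p.2 p.1) PySem.Dict.empty

-- ===== PORT A =====
-- the for-loop with its two early/continue branches, as structural recursion
def solLoopA (pos : PySem.Dict Char Int) (count : Int) : List Char → Bool
  | [] => true
  | c :: rest =>
    if pos.getD c 0 > count then false
    else if pos.getD c 0 == count then solLoopA pos (count + 1) rest
    else solLoopA pos count rest

def solution (skills_order : String) (skill_tree : String) : Bool :=
  solLoopA (mkPos skills_order) 1 skill_tree.toList

-- ===== PORT B =====
-- one pass building (seen, seq): distinct values ≥ 1 in first-appearance order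
def bStep (pos : PySem.Dict Char Int) (s : PySem.Set Int × List Int) (c : Char) :
    PySem.Set Int × List Int :=
  let v := pos.getD c 0
  if decide (1 ≤ v) && !(PySem.Set.contains s.1 v) then (PySem.Set.add s.1 v, s.2 ++ [v]) else s

def solution_alt (skills_order : String) (skill_tree : String) : Bool :=
  let pos := mkPos skills_order
  let seq := (skill_tree.toList.foldl (bStep pos) (PySem.Set.empty, [])).2
  seq == PySem.List.pyRange 1 ((seq.length : Int) + 1) 1

-- ===== PRECONDITION & SPEC =====
def Spec_solution (skills_order : String) (skill_tree : String) (out : Bool) : Prop := out = solution_alt skills_order skill_tree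
instance (skills_order : String) (skill_tree : String) (out : Bool) : Decidable (Spec_solution skills_order skill_tree out) := by unfold Spec_solution; infer_instance

-- ===== CLAIM (what is proved, stated in full; the proofs are below) =====
def Claim_equal_solution : Prop := ∀ (skills_order : String) (skill_tree : String), Dom_solution skills_order skill_tree → Spec_solution skills_order skill_tree (solution skills_order skill_tree)

-- ===== LEMMAS AND PROOFS =====

-- the fold only ever appends to the seq component
theorem bFold_suffix (pos : PySem.Dict Char Int) :
    ∀ (l : List Char) (s : PySem.Set Int × List Int),
      ∃ t, (l.foldl (bStep pos) s).2 = s.2 ++ t := by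
  intro l
  induction l with
  | nil => intro s; exact ⟨[], by simp⟩
  | cons c rest ih =>
    intro s
    simp only [List.foldl_cons]
    rcases ih (bStep pos s c) with ⟨t, ht⟩
    by_cases h : 1 ≤ pos.getD c 0 ∧ pos.getD c 0 ∉ s.1
    · exact ⟨pos.getD c 0 :: t, by simpa [bStep, h] using ht⟩
    · exact ⟨t, by simpa [bStep, h] using ht⟩

-- canonical range [1, …, k]
def canon (k : Nat) : List Int := PySem.List.pyRange 1 ((k : Int) + 1) 1

theorem canon_length (k : Nat) : (canon k).length = k := by
  simp [canon, PySem.List.length_pyRange_one]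

theorem canon_succ (k : Nat) : canon (k + 1) = canon k ++ [(k : Int) + 1] := by
  have h := PySem.List.pyRange_one_succ_right (a := 1) (b := (k : Int) + 1) (by omega)
  simpa [canon, push_cast, Nat.cast_add, Nat.cast_one, add_assoc] using h

-- main loop correspondence
theorem loop_eq (pos : PySem.Dict Char Int) :
    ∀ (l : List Char) (k : Nat) (seen : PySem.Set Int),
      (∀ v : Int, v ∈ seen ↔ 1 ≤ v ∧ v ≤ (k : Int)) →
      solLoopA pos ((k : Int) + 1) l =
        (let seq := (l.foldl (bStep pos) (seen, canon k)).2
         seq == PySem.List.pyRange 1 ((seq.length : Int) + 1) 1) := by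
  intro l
  induction l with
  | nil =>
    intro k seen hseen
    simp [solLoopA, canon]
  | cons c rest ih =>
    intro k seen hseen
    simp only [List.foldl_cons]
    set v := pos.getD c 0 with hv
    by_cases hgt : v > (k : Int) + 1
    · -- A returns False; B's seq gets a wrong element at index k
      have hstep : bStep pos (seen, canon k) c =
          (PySem.Set.add seen v, canon k ++ [v]) := by
        have hnm : v ∉ seen := by rw [hseen]; omega
        have h1 : (1 : Int) ≤ v := by omega
        simp [bStep, ← hv, hnm, h1]
      rcases bFold_suffix pos rest (PySem.Set.add seen v, canon k ++ [v]) with ⟨t, ht⟩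
      have hres : (rest.foldl (bStep pos) (bStep pos (seen, canon k) c)).2
          = canon k ++ (v :: t) := by rw [hstep]; simpa using ht
      have hne : ¬ (canon k ++ (v :: t) =
          PySem.List.pyRange 1 (((canon k ++ (v :: t)).length : Int) + 1) 1) := by
        intro heq
        have h1 : (canon k ++ (v :: t))[k]? = some v := by
          rw [List.getElem?_append_right (by simp [canon_length])]
          simp [canon_length]
        have hk : k < (canon k ++ (v :: t)).length := by simp [canon_length]
        have hlen : (PySem.List.pyRange 1 (((canon k ++ (v :: t)).length : Int) + 1) 1).length
            = (canon k ++ (v :: t)).length := by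
          simp [PySem.List.length_pyRange_one]
          omega
        have h2 : (PySem.List.pyRange 1 (((canon k ++ (v :: t)).length : Int) + 1) 1)[k]? = some (1 + (k : Int)) := by
          rw [List.getElem?_eq_getElem (by rw [hlen]; exact hk)]
          rw [PySem.List.getElem_pyRange_one]
        rw [heq, h2] at h1
        simp only [Option.some.injEq] at h1
        omega
      have hA : solLoopA pos ((k : Int) + 1) (c :: rest) = false := by
        simp [solLoopA, ← hv, hgt]
      rw [hA]
      simp only [hres]
      exact (beq_eq_false_iff_ne.mpr hne).symm
    · by_cases heq : v = (k : Int) + 1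
      · -- both advance
        have hnm : v ∉ seen := by rw [hseen]; omega
        have hstep : bStep pos (seen, canon k) c =
            (PySem.Set.add seen v, canon (k + 1)) := by
          have h1 : (1 : Int) ≤ v := by omega
          have hnm2 : ((k : Int) + 1) ∉ seen := heq ▸ hnm
          simp [bStep, ← hv, hnm2, canon_succ, heq]
        have hA : solLoopA pos ((k : Int) + 1) (c :: rest) =
            solLoopA pos ((k : Int) + 1 + 1) rest := by
          simp [solLoopA, ← hv, heq]
        rw [hA, hstep]
        have hseen' : ∀ w : Int, w ∈ PySem.Set.add seen v ↔ 1 ≤ w ∧ w ≤ ((k + 1 : Nat) : Int) := by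
          intro w
          rw [PySem.Set.mem_add, hseen]
          push_cast
          omega
        have := ih (k + 1) (PySem.Set.add seen v) hseen'
        simpa [push_cast, add_assoc] using this
      · -- v ≤ k : both skip
        have hle : v ≤ (k : Int) := by omega
        have hstep : bStep pos (seen, canon k) c = (seen, canon k) := by
          by_cases h1 : (1 : Int) ≤ v
          · have hm : v ∈ seen := by rw [hseen]; exact ⟨h1, hle⟩
            simp [bStep, ← hv, hm]
          · simp [bStep, ← hv, h1]
        have hA : solLoopA pos ((k : Int) + 1) (c :: rest) =
            solLoopA pos ((k : Int) + 1) rest := by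
          have : ¬ v = (k : Int) + 1 := heq
          simp [solLoopA, ← hv, hgt, this]
        rw [hA, hstep]
        exact ih k seen hseen

-- ===== VERDICT (by name: the statement is the Claim_ definition above) =====
theorem solution_spec : Claim_equal_solution := by
  intro so st _
  unfold Spec_solution solution solution_alt
  have h0 : ∀ v : Int, v ∈ (PySem.Set.empty : PySem.Set Int) ↔ 1 ≤ v ∧ v ≤ ((0 : Nat) : Int) := by
    intro v; simp [PySem.Set.empty]; omega
  have := loop_eq (mkPos so) st.toList 0 PySem.Set.empty h0
  have hc0 : canon 0 = [] := by
    simp [canon, PySem.List.pyRange_one_eq_nil]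
  rw [hc0] at this
  simpa using this
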